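-- pv_equiv track=rewrite | github.com/tomsilver/programmatic-policy-learning | src/programmatic_policy_learning/approaches/lpp_utils/utils.py | _feature_hamming_distance
-- ===== SOURCE A (Python) =====
-- def _feature_hamming_distance(
--     lhs: dict[str, bool],
--     rhs: dict[str, bool],
--     feature_names: list[str],
-- ) -> int:
--     return sum(
--         int(bool(lhs.get(name, False)) != bool(rhs.get(name, False)))
--         for name in feature_names
--     )
-- ===== SOURCE B (Python) =====
-- def _feature_hamming_distance(
--     lhs: dict[str, bool],
--     rhs: dict[str, bool],
--     feature_names: list[str],
-- ) -> int:
--     # Set-algebra formulation: names that are "true" on each side, symmetric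
--     # difference = names where the sides disagree, then add up how often each
--     # such name occurs in feature_names (multiplicity table built once).
--     true_l = {name for name in lhs if bool(lhs[name])}
--     true_r = {name for name in rhs if bool(rhs[name])}
--     diff = true_l ^ true_r
--     mult = {}
--     for name in feature_names:
--         mult[name] = mult.get(name, 0) + 1
--     return sum(c for name, c in mult.items() if name in diff)
-- ===== Notes on version B (the rewrite author's own statement) =====
-- stated objective: alternative
-- what changed: Replaces the per-name pairwise dict comparison with set algebra: build the sets of true-valued names on each side, take their symmetric difference, and sum the multiplicities of those names from a counting dict built over feature_names.
import Mathlib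
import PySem

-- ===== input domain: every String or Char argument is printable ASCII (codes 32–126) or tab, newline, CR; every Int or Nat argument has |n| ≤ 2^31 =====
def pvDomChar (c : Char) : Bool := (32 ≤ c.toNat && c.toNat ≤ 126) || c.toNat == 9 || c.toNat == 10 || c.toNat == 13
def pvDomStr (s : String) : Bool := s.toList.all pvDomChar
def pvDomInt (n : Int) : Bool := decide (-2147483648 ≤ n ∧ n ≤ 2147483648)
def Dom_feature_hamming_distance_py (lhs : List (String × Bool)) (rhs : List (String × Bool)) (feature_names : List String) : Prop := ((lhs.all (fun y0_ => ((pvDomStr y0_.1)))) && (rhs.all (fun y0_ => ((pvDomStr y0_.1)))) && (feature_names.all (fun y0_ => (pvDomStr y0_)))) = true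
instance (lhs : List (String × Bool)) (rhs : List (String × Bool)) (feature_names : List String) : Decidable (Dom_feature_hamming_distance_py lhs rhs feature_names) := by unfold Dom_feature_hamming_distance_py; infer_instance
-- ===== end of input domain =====

-- B replaces A's per-name pairwise dict comparison by set algebra (symmetric
-- difference of the true-valued name sets, weighted by a multiplicity dict);
-- an alternative of the same cost, proved to return the same value everywhere.


-- ===== PORT A =====
-- sum(int(bool(lhs.get(name, False)) != bool(rhs.get(name, False))) for name in feature_names)
def feature_hamming_distance_py (lhs : List (String × Bool)) (rhs : List (String × Bool)) (feature_names : List String) : Int :=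
  (feature_names.map (fun name =>
    if PySem.Dict.getD ⟨lhs⟩ name false ≠ PySem.Dict.getD ⟨rhs⟩ name false then (1 : Int) else 0)).sum

-- ===== PORT B =====
def feature_hamming_distance_py_alt (lhs : List (String × Bool)) (rhs : List (String × Bool)) (feature_names : List String) : Int :=
  let dl : PySem.Dict String Bool := ⟨lhs⟩
  let dr : PySem.Dict String Bool := ⟨rhs⟩
  -- true_l = {name for name in lhs if bool(lhs[name])} (and likewise true_r)
  let true_l : PySem.Set String := PySem.Set.ofList (dl.keys.filter (fun n => dl.getD n false))
  let true_r : PySem.Set String := PySem.Set.ofList (dr.keys.filter (fun n => dr.getD n false))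
  -- diff = true_l ^ true_r
  let diff := PySem.Set.symmDiff true_l true_r
  -- mult: name -> multiplicity in feature_names
  let mult := feature_names.foldl (fun d n => PySem.Dict.insert d n (PySem.Dict.getD d n 0 + 1)) PySem.Dict.empty
  -- sum(c for name, c in mult.items() if name in diff)
  ((mult.items.filter (fun p => PySem.Set.contains diff p.1)).map (fun p => p.2)).sum

-- ===== PRECONDITION & SPEC =====
def Spec_feature_hamming_distance_py (lhs : List (String × Bool)) (rhs : List (String × Bool)) (feature_names : List String) (out : Int) : Prop := out = feature_hamming_distance_py_alt lhs rhs feature_names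
instance (lhs : List (String × Bool)) (rhs : List (String × Bool)) (feature_names : List String) (out : Int) : Decidable (Spec_feature_hamming_distance_py lhs rhs feature_names out) := by unfold Spec_feature_hamming_distance_py; infer_instance

-- ===== CLAIM (what is proved, stated in full; the proofs are below) =====
def Claim_equal_feature_hamming_distance_py : Prop := ∀ (lhs : List (String × Bool)) (rhs : List (String × Bool)) (feature_names : List String), Dom_feature_hamming_distance_py lhs rhs feature_names → Spec_feature_hamming_distance_py lhs rhs feature_names (feature_hamming_distance_py lhs rhs feature_names)

-- ===== LEMMAS AND PROOFS =====

-- getD with default false is true exactly on the filtered key list used by B.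
theorem mem_true_set (xs : List (String × Bool)) (n : String) :
    n ∈ (PySem.Dict.keys (⟨xs⟩ : PySem.Dict String Bool)).filter
        (fun m => PySem.Dict.getD (⟨xs⟩ : PySem.Dict String Bool) m false) ↔
    PySem.Dict.getD (⟨xs⟩ : PySem.Dict String Bool) n false = true := by
  constructor
  · intro h
    exact (List.mem_filter.1 h).2
  · intro h
    refine List.mem_filter.2 ⟨?_, h⟩
    by_contra hn
    have : PySem.Dict.get? (⟨xs⟩ : PySem.Dict String Bool) n = none :=
      (PySem.Dict.get?_eq_none_iff_not_mem_keys _ _).2 hn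
    rw [PySem.Dict.getD_eq_get?_getD, this] at h
    simp at h

-- membership in B's symmetric-difference set = the two lookups disagree
theorem mem_diff_iff (lhs rhs : List (String × Bool)) (n : String) :
    PySem.Set.contains
      (PySem.Set.symmDiff
        (PySem.Set.ofList ((PySem.Dict.keys (⟨lhs⟩ : PySem.Dict String Bool)).filter
          (fun m => PySem.Dict.getD (⟨lhs⟩ : PySem.Dict String Bool) m false)))
        (PySem.Set.ofList ((PySem.Dict.keys (⟨rhs⟩ : PySem.Dict String Bool)).filter
          (fun m => PySem.Dict.getD (⟨rhs⟩ : PySem.Dict String Bool) m false)))) n =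
    decide (PySem.Dict.getD (⟨lhs⟩ : PySem.Dict String Bool) n false ≠
            PySem.Dict.getD (⟨rhs⟩ : PySem.Dict String Bool) n false) := by
  have hmem : PySem.Set.contains
      (PySem.Set.symmDiff
        (PySem.Set.ofList ((PySem.Dict.keys (⟨lhs⟩ : PySem.Dict String Bool)).filter
          (fun m => PySem.Dict.getD (⟨lhs⟩ : PySem.Dict String Bool) m false)))
        (PySem.Set.ofList ((PySem.Dict.keys (⟨rhs⟩ : PySem.Dict String Bool)).filter
          (fun m => PySem.Dict.getD (⟨rhs⟩ : PySem.Dict String Bool) m false)))) n = true ↔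
      PySem.Dict.getD (⟨lhs⟩ : PySem.Dict String Bool) n false ≠
      PySem.Dict.getD (⟨rhs⟩ : PySem.Dict String Bool) n false := by
    rw [PySem.Set.contains_iff, PySem.Set.mem_symmDiff]
    simp only [PySem.Set.mem_ofList, mem_true_set]
    rcases Bool.eq_false_or_eq_true (PySem.Dict.getD (⟨lhs⟩ : PySem.Dict String Bool) n false) with hl | hl <;>
      rcases Bool.eq_false_or_eq_true (PySem.Dict.getD (⟨rhs⟩ : PySem.Dict String Bool) n false) with hr | hr <;>
      simp [hl, hr]
  rw [Bool.eq_iff_iff, hmem, decide_eq_true_iff]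

-- summing each distinct name's count equals counting occurrences satisfying q
theorem sum_counts (q : String → Bool) (L : List String) :
    (((PySem.Set.ofList L).filter q).map (fun k => List.count k L)).sum = L.countP q := by
  have hperm : (PySem.Set.ofList L).Perm L.dedup := by
    rw [List.perm_ext_iff_of_nodup (PySem.Set.nodup_ofList L) L.nodup_dedup]
    intro a
    simp [PySem.Set.mem_ofList]
  calc (((PySem.Set.ofList L).filter q).map (fun k => List.count k L)).sum
      = ((L.dedup.filter q).map (fun k => List.count k L)).sum :=
        ((hperm.filter q).map _).sum_eq
    _ = L.countP q := List.sum_map_count_dedup_filter_eq_countP q L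

-- the indicator sum of A equals the countP of the disagreement predicate
theorem sum_indicator (q : String → Bool) (L : List String) :
    (L.map (fun n => if q n = true then (1 : Int) else 0)).sum = (L.countP q : Int) := by
  induction L with
  | nil => simp
  | cons x xs ih =>
    by_cases h : q x = true <;> simp [h, ih]; ring

-- ===== VERDICT (by name: the statement is the Claim_ definition above) =====
theorem feature_hamming_distance_py_spec : Claim_equal_feature_hamming_distance_py := by
  intro lhs rhs feature_names _
  unfold Spec_feature_hamming_distance_py
  simp only [feature_hamming_distance_py, feature_hamming_distance_py_alt]
  rw [PySem.Dict.foldl_insert_getD_add_one_eq_counter, PySem.Dict.items_counter]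
  set q : String → Bool := fun n =>
    decide (PySem.Dict.getD (⟨lhs⟩ : PySem.Dict String Bool) n false ≠
            PySem.Dict.getD (⟨rhs⟩ : PySem.Dict String Bool) n false) with hq
  have hfilter :
      (((PySem.Set.ofList feature_names).map (fun k => (k, (List.count k feature_names : Int)))).filter
        (fun p => PySem.Set.contains
          (PySem.Set.symmDiff
            (PySem.Set.ofList ((PySem.Dict.keys (⟨lhs⟩ : PySem.Dict String Bool)).filter
              (fun m => PySem.Dict.getD (⟨lhs⟩ : PySem.Dict String Bool) m false)))
            (PySem.Set.ofList ((PySem.Dict.keys (⟨rhs⟩ : PySem.Dict String Bool)).filter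
              (fun m => PySem.Dict.getD (⟨rhs⟩ : PySem.Dict String Bool) m false)))) p.1)) =
      (((PySem.Set.ofList feature_names).filter q).map (fun k => (k, (List.count k feature_names : Int)))) := by
    rw [List.filter_map]
    congr 1
    apply List.filter_congr
    intro x _
    simp only [Function.comp]
    rw [mem_diff_iff]
  rw [hfilter, List.map_map]
  have : ((((PySem.Set.ofList feature_names).filter q).map
      ((fun p : String × Int => p.2) ∘ fun k => (k, (List.count k feature_names : Int))))).sum
      = (feature_names.countP q : Int) := by
    rw [← sum_counts q feature_names, Nat.cast_list_sum, List.map_map]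
    simp [Function.comp_def]
  rw [this, ← sum_indicator q feature_names]
  simp [hq]
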